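-- pv_equiv track=rewrite | github.com/chpplen/nearly_orthogonal_array | lib_noa.py | levelsSeperate
-- ===== SOURCE A (Python) =====
-- import copy
--
-- def levelsSeperate(levels, levels_under, levels_dict):
--     """return remaining columns to be design"""
--     levels_sep = copy.copy(levels_under)
--     levels_dict = copy.copy(levels_dict)
--     levels = sorted(levels, reverse=True)
--     for level in levels:
--         if level in levels_dict:
--             if levels_dict[level] > 0:
--                 levels_dict[level] -= 1
--                 continue
--         levels_sep.append(level)
--     return levels_sep
-- ===== SOURCE B (Python) =====
-- def levelsSeperate(levels, levels_under, levels_dict):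
--     """return remaining columns to be design"""
--     counts = {}
--     for v in levels:
--         counts[v] = counts.get(v, 0) + 1
--     out = list(levels_under)
--     for v in sorted(counts, reverse=True):
--         c = counts[v]
--         consumed = min(c, max(0, levels_dict.get(v, 0)))
--         out += [v] * (c - consumed)
--     return out
-- ===== Notes on version B (the rewrite author's own statement) =====
-- stated objective: alternative
-- what changed: Replaces the per-element loop over the fully sorted list (with in-place budget decrements in a dict copy) by a frequency-count pass: build a counter of levels, iterate the distinct values in descending order once, and append count-minus-consumed copies of each value computed by min/max arithmetic.
import Mathlib
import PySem

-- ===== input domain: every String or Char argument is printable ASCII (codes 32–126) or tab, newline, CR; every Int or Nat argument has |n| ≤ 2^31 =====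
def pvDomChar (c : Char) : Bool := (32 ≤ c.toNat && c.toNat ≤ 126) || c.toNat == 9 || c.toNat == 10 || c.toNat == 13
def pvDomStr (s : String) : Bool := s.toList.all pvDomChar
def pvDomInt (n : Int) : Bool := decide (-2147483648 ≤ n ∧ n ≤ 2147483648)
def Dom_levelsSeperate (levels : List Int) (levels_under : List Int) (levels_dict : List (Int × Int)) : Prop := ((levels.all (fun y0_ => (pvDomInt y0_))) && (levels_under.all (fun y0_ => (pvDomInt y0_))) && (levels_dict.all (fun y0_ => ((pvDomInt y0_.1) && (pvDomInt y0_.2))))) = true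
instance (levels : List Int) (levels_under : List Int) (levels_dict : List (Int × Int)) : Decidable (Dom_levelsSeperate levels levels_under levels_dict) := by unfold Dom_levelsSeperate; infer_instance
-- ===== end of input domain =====

-- B replaces A's per-element decrement loop over the sorted list by one aggregate pass over the
-- distinct values (a counter + min/max arithmetic per value); same cost class, different algorithm.

-- ===== PORT A =====
-- the 'for level in levels' loop of A: state = (levels_sep accumulator, the mutated dict copy)
def levelsSeperateGo : List Int → List Int → PySem.Dict Int Int → List Int
  | [], sep, _ => sep
  | level :: rest, sep, d =>
    match d.get? level with
    | some b =>
      if b > 0 then levelsSeperateGo rest sep (d.insert level (b - 1))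
      else levelsSeperateGo rest (sep ++ [level]) d
    | none => levelsSeperateGo rest (sep ++ [level]) d

def levelsSeperate (levels : List Int) (levels_under : List Int) (levels_dict : List (Int × Int)) : List Int :=
  levelsSeperateGo (PySem.List.sorted levels (fun x => x) true) levels_under (PySem.Dict.ofList levels_dict)

-- ===== PORT B =====
def levelsSeperate_alt (levels : List Int) (levels_under : List Int) (levels_dict : List (Int × Int)) : List Int :=
  let counts := levels.foldl (fun d v => d.insert v (d.getD v 0 + 1)) PySem.Dict.empty
  let dd := PySem.Dict.ofList levels_dict
  (PySem.List.sorted counts.keys (fun x => x) true).foldl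
    (fun out v =>
      let c := counts.getD v 0
      let consumed := min c (max 0 (dd.getD v 0))
      out ++ PySem.List.pyRepeat [v] (c - consumed)) levels_under

-- ===== PRECONDITION & SPEC =====
def Spec_levelsSeperate (levels : List Int) (levels_under : List Int) (levels_dict : List (Int × Int)) (out : List Int) : Prop := out = levelsSeperate_alt levels levels_under levels_dict
instance (levels : List Int) (levels_under : List Int) (levels_dict : List (Int × Int)) (out : List Int) : Decidable (Spec_levelsSeperate levels levels_under levels_dict out) := by unfold Spec_levelsSeperate; infer_instance

-- ===== CLAIM (what is proved, stated in full; the proofs are below) =====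
def Claim_equal_levelsSeperate : Prop := ∀ (levels : List Int) (levels_under : List Int) (levels_dict : List (Int × Int)), Dom_levelsSeperate levels levels_under levels_dict → Spec_levelsSeperate levels levels_under levels_dict (levelsSeperate levels levels_under levels_dict)

-- ===== LEMMAS AND PROOFS =====

-- how many copies of v a run of c copies consumes from budget d[v]
def pvConsumed (d : PySem.Dict Int Int) (v : Int) (c : Nat) : Nat :=
  min c (max 0 (d.getD v 0)).toNat

-- A's loop over a run of c equal values v: consumes min(c, budget) and appends the rest;
-- the dict is only changed at key v.
theorem goA_replicate (c : Nat) (v : Int) :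
    ∀ (d : PySem.Dict Int Int) (sep rest : List Int),
    ∃ d' : PySem.Dict Int Int, (∀ w, w ≠ v → d'.get? w = d.get? w) ∧
      levelsSeperateGo (List.replicate c v ++ rest) sep d
        = levelsSeperateGo rest (sep ++ List.replicate (c - pvConsumed d v c) v) d' := by
  induction c with
  | zero => intro d sep rest; exact ⟨d, fun _ _ => rfl, by simp⟩
  | succ n ih =>
    intro d sep rest
    rw [List.replicate_succ, List.cons_append]
    match hg : d.get? v with
    | some b =>
      by_cases hb : b > 0
      · obtain ⟨d', hagree, heq⟩ := ih (d.insert v (b - 1)) sep rest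
        refine ⟨d', ?_, ?_⟩
        · intro w hw
          rw [hagree w hw, PySem.Dict.get?_insert_of_ne d _ hw]
        · rw [show levelsSeperateGo (v :: (List.replicate n v ++ rest)) sep d
              = levelsSeperateGo (List.replicate n v ++ rest) sep (d.insert v (b - 1)) by
                simp [levelsSeperateGo, hg, hb], heq]
          have h1 : (d.insert v (b - 1)).getD v 0 = b - 1 :=
            PySem.Dict.getD_insert_self d v (b - 1) 0
          have h2 : d.getD v 0 = b := by simp [PySem.Dict.getD, hg]
          have harith : n - pvConsumed (d.insert v (b - 1)) v n = n + 1 - pvConsumed d v (n + 1) := by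
            simp only [pvConsumed, h1, h2]; omega
          rw [harith]
      · have h2 : d.getD v 0 = b := by simp [PySem.Dict.getD, hg]
        obtain ⟨d', hagree, heq⟩ := ih d (sep ++ [v]) rest
        refine ⟨d', hagree, ?_⟩
        rw [show levelsSeperateGo (v :: (List.replicate n v ++ rest)) sep d
            = levelsSeperateGo (List.replicate n v ++ rest) (sep ++ [v]) d by
              simp [levelsSeperateGo, hg, hb], heq]
        congr 1
        simp only [pvConsumed, h2, List.append_assoc]
        have hmax : (max 0 b).toNat = 0 := by omega
        congr 1
        rw [hmax]
        simp [List.replicate_succ]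
    | none =>
      have h2 : d.getD v 0 = 0 := by simp [PySem.Dict.getD, hg]
      obtain ⟨d', hagree, heq⟩ := ih d (sep ++ [v]) rest
      refine ⟨d', hagree, ?_⟩
      rw [show levelsSeperateGo (v :: (List.replicate n v ++ rest)) sep d
          = levelsSeperateGo (List.replicate n v ++ rest) (sep ++ [v]) d by
            simp [levelsSeperateGo, hg], heq]
      congr 1
      simp only [pvConsumed, h2, List.append_assoc]
      congr 1
      simp [List.replicate_succ]

-- A's whole loop over the grouped list = B's fold over the distinct values (fixed dict d).
theorem goA_flatMap (cnt : Int → Nat) :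
    ∀ (ks : List Int), ks.Nodup → ∀ (d : PySem.Dict Int Int) (sep : List Int),
    levelsSeperateGo (ks.flatMap fun v => List.replicate (cnt v) v) sep d
      = ks.foldl (fun out v => out ++ List.replicate (cnt v - pvConsumed d v (cnt v)) v) sep := by
  intro ks
  induction ks with
  | nil => intro _ d sep; simp [levelsSeperateGo]
  | cons v ks ih =>
    intro hnd d sep
    rw [List.flatMap_cons]
    obtain ⟨d', hagree, heq⟩ := goA_replicate (cnt v) v d sep (ks.flatMap fun v => List.replicate (cnt v) v)
    rw [heq, ih hnd.of_cons d' _]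
    apply PySem.List.foldl_congr_mem
    intro acc x hx
    have hxv : x ≠ v := fun h => (List.nodup_cons.mp hnd).1 (h ▸ hx)
    have : d'.getD x 0 = d.getD x 0 := by simp [PySem.Dict.getD, hagree x hxv]
    simp [pvConsumed, this]

-- count of the grouped list
theorem count_flatMap_replicate (cnt : Int → Nat) (ks : List Int) (hnd : ks.Nodup) (w : Int) :
    (ks.flatMap fun v => List.replicate (cnt v) v).count w = if w ∈ ks then cnt w else 0 := by
  induction ks with
  | nil => simp
  | cons v ks ih =>
    rw [List.flatMap_cons, List.count_append, ih hnd.of_cons]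
    by_cases hw : w = v
    · subst hw
      simp [(List.nodup_cons.mp hnd).1]
    · simp [List.count_replicate, hw, Ne.symm hw, List.mem_cons]

-- the grouped list is descending when the distinct values are
theorem pairwise_flatMap_replicate (cnt : Int → Nat) (ks : List Int)
    (h : ks.Pairwise (fun a b => b ≤ a)) :
    (ks.flatMap fun v => List.replicate (cnt v) v).Pairwise (fun a b : Int => b ≤ a) := by
  induction ks with
  | nil => simp
  | cons v ks ih =>
    rw [List.flatMap_cons, List.pairwise_append]
    refine ⟨(by simp [List.pairwise_replicate]), ih (List.pairwise_cons.mp h).2, ?_⟩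
    intro a ha b hb
    obtain ⟨w, hw, hbw⟩ := List.mem_flatMap.mp hb
    rw [List.eq_of_mem_replicate ha, List.eq_of_mem_replicate hbw]
    exact (List.pairwise_cons.mp h).1 w hw

-- the sorted list IS the grouped list over its sorted distinct values
theorem sorted_eq_flatMap (levels : List Int) :
    PySem.List.sorted levels (fun x => x) true
      = (PySem.List.sorted (PySem.Set.ofList levels) (fun x => x) true).flatMap
          (fun v => List.replicate (levels.count v) v) := by
  set ks := PySem.List.sorted (PySem.Set.ofList levels) (fun x => x) true with hks
  have hnd : ks.Nodup :=
    ((PySem.List.sorted_perm (PySem.Set.ofList levels) (fun x => x) true).nodup_iff).mpr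
      (PySem.Set.nodup_ofList levels)
  have hperm : (PySem.List.sorted levels (fun x => x) true).Perm
      (ks.flatMap fun v => List.replicate (levels.count v) v) := by
    refine (PySem.List.sorted_perm levels (fun x => x) true).trans (List.perm_iff_count.mpr ?_)
    intro w
    rw [count_flatMap_replicate _ ks hnd w]
    by_cases hw : w ∈ levels
    · have : w ∈ ks := by
        rw [hks, PySem.List.mem_sorted, PySem.Set.mem_ofList]; exact hw
      simp [this]
    · have : w ∉ ks := by
        rw [hks, PySem.List.mem_sorted, PySem.Set.mem_ofList]; exact hw
      simp [this, List.count_eq_zero_of_not_mem hw]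
  refine List.Perm.eq_of_pairwise (fun a b _ _ h1 h2 => le_antisymm h2 h1) ?_ ?_ hperm
  · exact PySem.List.sorted_pairwise_rev levels (fun x => x)
  · exact pairwise_flatMap_replicate _ ks (PySem.List.sorted_pairwise_rev _ _)

-- ===== VERDICT (by name: the statement is the Claim_ definition above) =====
theorem levelsSeperate_spec : Claim_equal_levelsSeperate := by
  intro levels levels_under levels_dict _
  unfold Spec_levelsSeperate levelsSeperate levelsSeperate_alt
  dsimp only
  rw [PySem.Dict.foldl_insert_getD_add_one_eq_counter, PySem.Dict.keys_counter]
  set ks := PySem.List.sorted (PySem.Set.ofList levels) (fun x => x) true with hks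
  have hnd : ks.Nodup :=
    ((PySem.List.sorted_perm (PySem.Set.ofList levels) (fun x => x) true).nodup_iff).mpr
      (PySem.Set.nodup_ofList levels)
  rw [sorted_eq_flatMap, ← hks,
    goA_flatMap (fun v => levels.count v) ks hnd (PySem.Dict.ofList levels_dict) levels_under]
  apply PySem.List.foldl_congr_mem
  intro acc x _
  rw [PySem.Dict.getD_counter, PySem.List.pyRepeat_singleton]
  congr 2
  simp only [pvConsumed]
  omega
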